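-- pv_equiv track=rewrite | github.com/waegaein/boj | week11/10545/run.py | get_strokes
-- ===== SOURCE A (Python) =====
-- def get_strokes(message):
--     default_mapping = {
--         'a': '2', 'b': '22', 'c': '222',
--         'd': '3', 'e': '33', 'f': '333',
--         'g': '4', 'h': '44', 'i': '444',
--         'j': '5', 'k': '55', 'l': '555',
--         'm': '6', 'n': '66', 'o': '666',
--         'p': '7', 'q': '77', 'r': '777', 's': '7777',
--         't': '8', 'u': '88', 'v': '888',
--         'w': '9', 'x': '99', 'y': '999', 'z': '9999'
--     }
--     strokes = list()
--     for character in message: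
--         strokes.append(default_mapping[character])
--
--     for i in range(len(strokes)-1):
--         if strokes[i][0] == strokes[i+1][0]:
--             strokes[i] += '#'
--
--     return strokes
-- ===== SOURCE B (Python) =====
-- def get_strokes(message):
--     groups = {'2': 'abc', '3': 'def', '4': 'ghi', '5': 'jkl',
--               '6': 'mno', '7': 'pqrs', '8': 'tuv', '9': 'wxyz'}
--     digit = {c: d for d, letters in groups.items() for c in letters}
--     out = []
--     i, n = 0, len(message)
--     while i < n:
--         d = digit[message[i]]          # KeyError for unmapped characters, like A
--         j = i + 1
--         while j < n and digit[message[j]] == d: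
--             j += 1
--         run = [d * (groups[d].index(c) + 1) for c in message[i:j]]
--         out.extend(s + '#' for s in run[:-1])
--         out.append(run[-1])
--         i = j
--     return out
-- ===== Notes on version B (the rewrite author's own statement) =====
-- stated objective: alternative
-- what changed: B traverses the message as maximal same-digit runs (an outer loop scans to each run's end, codes the whole run from the digit's letter group as digit*(position+1), and appends '#' to every code of the run except the last), replacing A's per-character table pass followed by a separate index loop comparing adjacent codes' first characters.
-- outside the precondition, e.g. on get_strokes('#'): A raises KeyError, B raises KeyError; on get_strokes('a b'): A raises KeyError, B raises KeyError
import Mathlib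
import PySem

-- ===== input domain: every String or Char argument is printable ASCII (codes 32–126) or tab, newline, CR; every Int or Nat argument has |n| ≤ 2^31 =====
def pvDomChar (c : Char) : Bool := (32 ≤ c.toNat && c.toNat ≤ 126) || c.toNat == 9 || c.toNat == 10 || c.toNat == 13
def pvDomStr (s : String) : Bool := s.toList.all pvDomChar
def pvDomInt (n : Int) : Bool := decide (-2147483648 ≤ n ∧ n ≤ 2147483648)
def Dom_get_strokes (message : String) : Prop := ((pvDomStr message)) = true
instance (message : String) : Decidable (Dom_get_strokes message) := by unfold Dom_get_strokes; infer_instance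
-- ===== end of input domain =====

-- B traverses maximal same-digit RUNS (scan to the run's end, code the run, '#' on all but its last)
-- instead of A's per-character table pass followed by an adjacent-pair fix-up loop; equivalence of the
-- return value is proved for messages of lowercase letters (elsewhere A raises KeyError).

-- ===== PORT A =====
def pvMapA : PySem.Dict Char String := PySem.Dict.ofList
  [('a',"2"),('b',"22"),('c',"222"),
   ('d',"3"),('e',"33"),('f',"333"),
   ('g',"4"),('h',"44"),('i',"444"),
   ('j',"5"),('k',"55"),('l',"555"),
   ('m',"6"),('n',"66"),('o',"666"),
   ('p',"7"),('q',"77"),('r',"777"),('s',"7777"),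
   ('t',"8"),('u',"88"),('v',"888"),
   ('w',"9"),('x',"99"),('y',"999"),('z',"9999")]

-- s[0] of a Python string (none = IndexError; under Pre_ all codes are nonempty)
def pvHead (s : String) : Option Char := PySem.Str.pyGet? s 0

-- one iteration of A's second loop: if strokes[i][0] == strokes[i+1][0]: strokes[i] += '#'
def pvStepA (st : List String) (i : Nat) : List String :=
  if pvHead (st.getD i "") == pvHead (st.getD (i + 1) "") then
    st.set i ((st.getD i "") ++ "#")
  else st

def get_strokes (message : String) : List String :=
  let strokes := message.toList.foldl (fun acc c => acc ++ [pvMapA.getD c ""]) []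
  (List.range (strokes.length - 1)).foldl pvStepA strokes

-- ===== PORT B =====
-- groups = {'2':'abc', …}
def pvGroups : PySem.Dict String String := PySem.Dict.ofList
  [("2","abc"),("3","def"),("4","ghi"),("5","jkl"),
   ("6","mno"),("7","pqrs"),("8","tuv"),("9","wxyz")]

-- digit = {c: d for d, letters in groups.items() for c in letters}
def pvDigitB : PySem.Dict Char String :=
  pvGroups.items.foldl
    (fun dd p => p.2.toList.foldl (fun d2 c => d2.insert c p.1) dd)
    PySem.Dict.empty

def pvDigB (c : Char) : String := pvDigitB.getD c ""

-- d * (groups[d].index(c) + 1)   (.index found under Pre_, so getD 0 is never taken)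
def pvCodeRun (d : String) (c : Char) : String :=
  String.ofList (PySem.List.pyRepeat d.toList
    (((PySem.List.index? (pvGroups.getD d "").toList c).getD 0 : Int) + 1))

-- B's outer while-loop: take the maximal run of chars with the head's digit, emit its codes
-- ('#' on all but the run's last), continue after the run.
def pvRunsB : List Char → List String
  | [] => []
  | c :: rest =>
      (((c :: rest.takeWhile (fun x => pvDigB x == pvDigB c)).map
          (pvCodeRun (pvDigB c))).dropLast.map (· ++ "#"))
      ++ [((c :: rest.takeWhile (fun x => pvDigB x == pvDigB c)).map
          (pvCodeRun (pvDigB c))).getLastD ""]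
      ++ pvRunsB (rest.dropWhile (fun x => pvDigB x == pvDigB c))
  termination_by cs => cs.length
  decreasing_by
    simpa [Nat.lt_succ_iff] using List.length_dropWhile_le (fun x => pvDigB x == pvDigB c) rest

def get_strokes_alt (message : String) : List String := pvRunsB message.toList

-- ===== PRECONDITION & SPEC =====
-- Pre_ excludes exactly the messages containing a character that is not a lowercase letter, on which A raises KeyError.
def Pre_get_strokes (message : String) : Prop :=
  (message.toList.all (fun c => "abcdefghijklmnopqrstuvwxyz".toList.contains c)) = true
instance (message : String) : Decidable (Pre_get_strokes message) := by
  unfold Pre_get_strokes; infer_instance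

def pvWitness_get_strokes : String := "hello"

def Spec_get_strokes (message : String) (out : List String) : Prop := out = get_strokes_alt message
instance (message : String) (out : List String) : Decidable (Spec_get_strokes message out) := by
  unfold Spec_get_strokes; infer_instance

-- ===== CLAIM (what is proved, stated in full; the proofs are below) =====
def Claim_equal_get_strokes : Prop :=
  ∀ (message : String), Dom_get_strokes message → Pre_get_strokes message →
    Spec_get_strokes message (get_strokes message)

-- ===== LEMMAS AND PROOFS =====

-- per-character views of the two lookups
def pvCodeA (c : Char) : String := pvMapA.getD c ""
def pvCodeB (c : Char) : String := pvCodeRun (pvDigB c) c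

-- common normal form: lookahead recursion over the characters
def pvGo : List Char → List String
  | [] => []
  | c :: rest =>
      (match rest with
       | [] => pvCodeB c
       | c2 :: _ => if pvDigB c == pvDigB c2 then pvCodeB c ++ "#" else pvCodeB c) :: pvGo rest

-- A's second loop as a pairwise recursion
def pvFix : List String → List String
  | [] => []
  | [s] => [s]
  | s :: t :: r => (if pvHead s == pvHead t then s ++ "#" else s) :: pvFix (t :: r)

theorem pvStepA_shift (x : String) (xs : List String) (i : Nat) :
    pvStepA (x :: xs) (i + 1) = x :: pvStepA xs i := by
  simp [pvStepA]
  split <;> rfl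

theorem pvFold_shift (is : List Nat) (x : String) (xs : List String) :
    (is.map (· + 1)).foldl pvStepA (x :: xs) = x :: is.foldl pvStepA xs := by
  induction is generalizing xs with
  | nil => rfl
  | cons i is ih => simp [List.foldl_cons, pvStepA_shift, ih]

theorem pvRangeFold_eq_fix (L : List String) :
    (List.range (L.length - 1)).foldl pvStepA L = pvFix L := by
  induction L with
  | nil => rfl
  | cons s L ih =>
    cases L with
    | nil => rfl
    | cons t r =>
      have hlen : (s :: t :: r).length - 1 = r.length + 1 := by simp
      rw [hlen, List.range_succ_eq_map, List.foldl_cons]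
      have hstep : pvStepA (s :: t :: r) 0 =
          (if pvHead s == pvHead t then s ++ "#" else s) :: t :: r := by
        simp [pvStepA]
        split <;> rfl
      rw [hstep]
      have hmap : (List.range r.length).map Nat.succ
          = (List.range r.length).map (· + 1) := rfl
      rw [hmap, pvFold_shift]
      have hlen2 : (t :: r).length - 1 = r.length := by simp
      rw [hlen2] at ih
      rw [ih]
      simp [pvFix]

theorem pvA_eq_fix (message : String) :
    get_strokes message = pvFix (message.toList.map pvCodeA) := by
  unfold get_strokes
  rw [PySem.List.foldl_append_singleton_eq_map]
  simp only [List.nil_append]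
  exact pvRangeFold_eq_fix _

-- emitting a run of length ≥ 2 peels off its head with '#'
theorem pvEmit_cons (a b : String) (l t : List String) :
    ((a :: b :: l).dropLast.map (· ++ "#")) ++ [(a :: b :: l).getLastD ""] ++ t
    = (a ++ "#") :: (((b :: l).dropLast.map (· ++ "#")) ++ [(b :: l).getLastD ""] ++ t) := by
  simp [List.dropLast_cons_of_ne_nil]

-- B's run recursion equals the lookahead normal form (no precondition needed:
-- both attach '#' exactly when the next character has the same pvDigB digit).
theorem pvRunsB_eq_go (cs : List Char) : pvRunsB cs = pvGo cs := by
  induction hn : cs.length using Nat.strong_induction_on generalizing cs with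
  | _ n ih =>
    cases cs with
    | nil => rw [pvRunsB]; rfl
    | cons c rest =>
      cases rest with
      | nil =>
        simp only [pvRunsB, List.takeWhile_nil, List.dropWhile_nil]
        rfl
      | cons c2 r =>
        have hrec := ih (c2 :: r).length (by simp [← hn]) (c2 :: r) rfl
        have hgo : pvGo (c :: c2 :: r) =
            (if pvDigB c == pvDigB c2 then pvCodeB c ++ "#" else pvCodeB c)
              :: pvGo (c2 :: r) := rfl
        by_cases hd : pvDigB c2 = pvDigB c
        · -- same digit: run continues into c2
          have ht : (pvDigB c == pvDigB c2) = true := beq_iff_eq.mpr hd.symm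
          rw [hgo, ht, if_pos rfl, ← hrec, pvRunsB]
          conv_rhs => rw [pvRunsB]
          simp only [List.takeWhile_cons, List.dropWhile_cons, hd, beq_self_eq_true,
            if_true, List.map_cons]
          exact pvEmit_cons _ _ _ _
        · -- digit changes: run is just [c]
          have hb : (pvDigB c2 == pvDigB c) = false := beq_eq_false_iff_ne.mpr hd
          have hf : (pvDigB c == pvDigB c2) = false := beq_eq_false_iff_ne.mpr (fun h => hd h.symm)
          rw [hgo, hf, if_neg Bool.false_ne_true, ← hrec, pvRunsB]
          simp only [List.takeWhile_cons, List.dropWhile_cons, hb, Bool.false_eq_true,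
            if_false]
          rfl

-- finite tables: A's code equals B's code, and A's first-character test equals B's digit test
theorem pvCode_agree : ∀ c ∈ "abcdefghijklmnopqrstuvwxyz".toList, pvCodeA c = pvCodeB c := by
  have h : (("abcdefghijklmnopqrstuvwxyz".toList).all
      (fun c => pvCodeA c == pvCodeB c)) = true := by decide
  intro c hc
  have hb := List.all_eq_true.mp h c hc
  simpa using hb

theorem pvCond_agree : ∀ c ∈ "abcdefghijklmnopqrstuvwxyz".toList,
    ∀ c2 ∈ "abcdefghijklmnopqrstuvwxyz".toList,
    (pvHead (pvCodeA c) == pvHead (pvCodeA c2)) = (pvDigB c == pvDigB c2) := by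
  have h : (("abcdefghijklmnopqrstuvwxyz".toList).all (fun c =>
      ("abcdefghijklmnopqrstuvwxyz".toList).all (fun c2 =>
        (pvHead (pvCodeA c) == pvHead (pvCodeA c2)) == (pvDigB c == pvDigB c2)))) = true := by
    decide
  intro c hc c2 hc2
  have hb := List.all_eq_true.mp (List.all_eq_true.mp h c hc) c2 hc2
  simpa using hb

theorem pvFix_eq_go (cs : List Char)
    (h : ∀ c ∈ cs, c ∈ "abcdefghijklmnopqrstuvwxyz".toList) :
    pvFix (cs.map pvCodeA) = pvGo cs := by
  induction cs with
  | nil => rfl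
  | cons c rest ih =>
    cases rest with
    | nil => simp [pvFix, pvGo, pvCode_agree c (h c (by simp))]
    | cons c2 r =>
      have hc := h c (by simp)
      have hc2 := h c2 (by simp)
      have hrest : ∀ x ∈ c2 :: r, x ∈ "abcdefghijklmnopqrstuvwxyz".toList := by
        intro x hx; exact h x (by simp [List.mem_cons] at hx ⊢; tauto)
      have hgo : pvGo (c :: c2 :: r) =
          (if pvDigB c == pvDigB c2 then pvCodeB c ++ "#" else pvCodeB c) :: pvGo (c2 :: r) := rfl
      have hfix : pvFix (List.map pvCodeA (c :: c2 :: r)) =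
          (if pvHead (pvCodeA c) == pvHead (pvCodeA c2) then pvCodeA c ++ "#" else pvCodeA c)
            :: pvFix (List.map pvCodeA (c2 :: r)) := rfl
      rw [hfix, hgo, pvCond_agree c hc c2 hc2, pvCode_agree c hc, ih hrest]

-- ===== VERDICT (by name: the statement is the Claim_ definition above) =====
theorem get_strokes_spec : Claim_equal_get_strokes := by
  intro message _ hpre
  have hpre' : ∀ c ∈ message.toList, c ∈ "abcdefghijklmnopqrstuvwxyz".toList := by
    intro c hc
    simpa using List.all_eq_true.mp hpre c hc
  unfold Spec_get_strokes
  rw [pvA_eq_fix, pvFix_eq_go _ hpre']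
  unfold get_strokes_alt
  rw [pvRunsB_eq_go]
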